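-- pv_equiv track=rewrite | github.com/nagendra333333/AI-Driven-Expense-Tracker-Public | budget_insights_public.py | budget_key_for
-- ===== SOURCE A (Python) =====
-- def normalize_cat(c: str) -> str:
--     """Lowercase + strip for fuzzy budget matching."""
--     return str(c).strip().lower()
--
-- def budget_key_for(cat: str, budget: dict) -> str | None:
--     """Find the budget dict key that best matches a category name."""
--     cl = normalize_cat(cat)
--     # Exact (case-insensitive)
--     for k in budget:
--         if normalize_cat(k) == cl:
--             return k
--     # Partial
--     for k in budget:
--         kl = normalize_cat(k)
--         if kl in cl or cl in kl:
--             return k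
--     # Manual mappings
--     ALIAS = {
--         "electricity": "eb",
--         "eb": "electricity",
--         "dth + ott + net + mobile": "dth+ott+net+mobile",
--         "dth+ott+net+mobile": "dth + ott + net + mobile",
--         "home things": "misc",
--         "miscellaneous": "misc",
--         "mobile accessories": "misc",
--         "medicine": "misc",
--     }
--     mapped = ALIAS.get(cl)
--     if mapped:
--         for k in budget:
--             if normalize_cat(k) == mapped:
--                 return k
--     return None
-- ===== SOURCE B (Python) =====
-- ALIAS = {
--     "electricity": "eb",
--     "eb": "electricity",
--     "dth + ott + net + mobile": "dth+ott+net+mobile",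
--     "dth+ott+net+mobile": "dth + ott + net + mobile",
--     "home things": "misc",
--     "miscellaneous": "misc",
--     "mobile accessories": "misc",
--     "medicine": "misc",
-- }
--
-- def normalize_cat(c: str) -> str:
--     return str(c).strip().lower()
--
-- def budget_key_for(cat: str, budget: dict) -> str | None:
--     """Rank-based single scan: score every key (0 exact, 1 substring, 2 alias)
--     and keep the first key of minimal rank; no staged scans over the dict."""
--     cl = normalize_cat(cat)
--     mapped = ALIAS.get(cl)
--     best = None  # (rank, key)
--     for k in budget:
--         kl = normalize_cat(k)
--         if kl == cl:
--             r = 0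
--         elif kl in cl or cl in kl:
--             r = 1
--         elif mapped and kl == mapped:
--             r = 2
--         else:
--             continue
--         if best is None or r < best[0]:
--             best = (r, k)
--     return best[1] if best is not None else None
-- ===== Notes on version B (the rewrite author's own statement) =====
-- stated objective: alternative
-- what changed: Replaces A's three staged scans (exact, partial, alias) with a single rank-based scan: each key gets a score (0 exact, 1 substring, 2 alias-mapped), the alias lookup is hoisted before the loop, and the first key of minimal rank wins.
import Mathlib
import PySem

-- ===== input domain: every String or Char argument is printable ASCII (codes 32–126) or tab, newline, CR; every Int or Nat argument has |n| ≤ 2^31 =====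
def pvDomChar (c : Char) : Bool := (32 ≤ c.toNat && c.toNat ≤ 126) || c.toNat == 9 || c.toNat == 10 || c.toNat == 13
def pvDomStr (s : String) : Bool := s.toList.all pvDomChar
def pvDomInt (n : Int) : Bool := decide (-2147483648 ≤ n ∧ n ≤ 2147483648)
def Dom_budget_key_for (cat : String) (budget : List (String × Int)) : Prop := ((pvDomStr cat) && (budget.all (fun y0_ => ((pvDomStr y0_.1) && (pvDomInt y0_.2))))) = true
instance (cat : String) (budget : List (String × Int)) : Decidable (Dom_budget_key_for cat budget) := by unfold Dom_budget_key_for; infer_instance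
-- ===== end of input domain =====

-- B replaces A's three staged scans (exact, then partial, then alias) by a single
-- rank-based scan (0 exact, 1 substring, 2 alias-mapped) keeping the first key of
-- minimal rank; same cost, a different decomposition.

-- normalize_cat: str(c).strip().lower()  (shared helper of both Pythons)
def bkNorm (c : String) : String := PySem.Str.lower (PySem.Str.strip c)

-- the ALIAS literal dict (shared by both Pythons)
def bkAlias : PySem.Dict String String := PySem.Dict.ofList
  [("electricity", "eb"), ("eb", "electricity"),
   ("dth + ott + net + mobile", "dth+ott+net+mobile"),
   ("dth+ott+net+mobile", "dth + ott + net + mobile"),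
   ("home things", "misc"), ("miscellaneous", "misc"),
   ("mobile accessories", "misc"), ("medicine", "misc")]

-- ===== PORT A =====
-- A's exact loop (also the loop inside A's alias fallback)
def bkFindNorm (t : String) : List (String × Int) → Option String
  | [] => none
  | (k, _) :: rest => if bkNorm k == t then some k else bkFindNorm t rest

-- A's partial loop
def bkPartial (cl : String) : List (String × Int) → Option String
  | [] => none
  | (k, _) :: rest =>
    let kl := bkNorm k
    if PySem.Str.isIn kl cl || PySem.Str.isIn cl kl then some k else bkPartial cl rest

-- A's 'mapped = ALIAS.get(cl); if mapped:' fallback ('if mapped' = nonempty string)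
def bkAliasFallback (cl : String) (budget : List (String × Int)) : Option String :=
  match bkAlias.get? cl with
  | some m => if m ≠ "" then bkFindNorm m budget else none
  | none => none

def budget_key_for (cat : String) (budget : List (String × Int)) : Option String :=
  let cl := bkNorm cat
  match bkFindNorm cl budget with
  | some k => some k
  | none =>
    match bkPartial cl budget with
    | some k => some k
    | none => bkAliasFallback cl budget

-- ===== PORT B =====
-- B's rank of one normalized key: 0 exact, 1 substring, 2 alias-mapped, none otherwise
-- ('elif mapped and kl == mapped' — truthiness of the string mapped is m != "")
def bkRank? (cl : String) (mapped : Option String) (kl : String) : Option Nat :=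
  if kl == cl then some 0
  else if PySem.Str.isIn kl cl || PySem.Str.isIn cl kl then some 1
  else
    match mapped with
    | some m => if m != "" && kl == m then some 2 else none
    | none => none

-- B's loop body: rank the key and replace best on a strictly smaller rank
def bkStep (cl : String) (mapped : Option String) (best : Option (Nat × String))
    (k : String) : Option (Nat × String) :=
  match bkRank? cl mapped (bkNorm k) with
  | none => best
  | some r =>
    match best with
    | none => some (r, k)
    | some b => if r < b.1 then some (r, k) else some b

-- B's loop: keep the first key of minimal rank
def bkBest (cl : String) (mapped : Option String) (best : Option (Nat × String)) :
    List (String × Int) → Option (Nat × String)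
  | [] => best
  | (k, _) :: rest => bkBest cl mapped (bkStep cl mapped best k) rest

def budget_key_for_alt (cat : String) (budget : List (String × Int)) : Option String :=
  let cl := bkNorm cat
  let mapped := bkAlias.get? cl
  (bkBest cl mapped none budget).map Prod.snd

-- ===== PRECONDITION & SPEC =====
def Spec_budget_key_for (cat : String) (budget : List (String × Int)) (out : Option String) : Prop := out = budget_key_for_alt cat budget
instance (cat : String) (budget : List (String × Int)) (out : Option String) : Decidable (Spec_budget_key_for cat budget out) := by unfold Spec_budget_key_for; infer_instance

-- ===== CLAIM (what is proved, stated in full; the proofs are below) =====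
def Claim_equal_budget_key_for : Prop := ∀ (cat : String) (budget : List (String × Int)), Dom_budget_key_for cat budget → Spec_budget_key_for cat budget (budget_key_for cat budget)

-- ===== LEMMAS AND PROOFS =====

def bkMerge (b p : Option (Nat × String)) : Option (Nat × String) :=
  match b, p with
  | none, p => p
  | some b, none => some b
  | some b, some p => if p.1 < b.1 then some p else some b
def bkSing (cl : String) (mapped : Option String) (k : String) : Option (Nat × String) :=
  (bkRank? cl mapped (bkNorm k)).map (fun r => (r, k))
theorem bkMerge_none_right (b : Option (Nat × String)) : bkMerge b none = b := by
  cases b <;> rfl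
theorem bkMerge_assoc (a b c : Option (Nat × String)) :
    bkMerge (bkMerge a b) c = bkMerge a (bkMerge b c) := by
  cases a with
  | none => rfl
  | some x =>
    cases b with
    | none => rfl
    | some y =>
      cases c with
      | none => rw [bkMerge_none_right, bkMerge_none_right]
      | some z =>
        by_cases h1 : y.1 < x.1 <;> by_cases h2 : z.1 < y.1 <;>
          simp only [bkMerge, h1, h2, if_true, if_false] <;>
          split_ifs <;> first | rfl | omega
theorem bkStep_eq_merge (cl : String) (mapped : Option String) (b : Option (Nat × String))
    (k : String) : bkStep cl mapped b k = bkMerge b (bkSing cl mapped k) := by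
  unfold bkStep bkSing
  cases bkRank? cl mapped (bkNorm k) <;> cases b <;> simp [bkMerge]
theorem bkBest_merge (cl : String) (mapped : Option String) (b c : Option (Nat × String))
    (l : List (String × Int)) :
    bkBest cl mapped (bkMerge b c) l = bkMerge b (bkBest cl mapped c l) := by
  induction l generalizing c with
  | nil => rfl
  | cons hd tl ih =>
    obtain ⟨k, v⟩ := hd
    simp only [bkBest]
    rw [bkStep_eq_merge, bkMerge_assoc, ← bkStep_eq_merge, ih]
theorem bkBest_cons (cl : String) (mapped : Option String) (k : String) (v : Int)
    (l : List (String × Int)) :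
    bkBest cl mapped none ((k, v) :: l) = bkMerge (bkSing cl mapped k) (bkBest cl mapped none l) := by
  simp only [bkBest]
  rw [bkStep_eq_merge]
  have h : bkMerge none (bkSing cl mapped k) = bkMerge (bkMerge (bkSing cl mapped k) none) none := by
    rw [bkMerge_none_right, bkMerge_none_right]; rfl
  rw [h, bkBest_merge, bkMerge_none_right]
theorem bkMerge_zero (k : String) (t : Option (Nat × String)) :
    bkMerge (some (0, k)) t = some (0, k) := by
  cases t <;> simp [bkMerge]
def bkTri (cl : String) (mapped : Option String) (l : List (String × Int)) :
    Option (Nat × String) :=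
  match bkFindNorm cl l with
  | some k => some (0, k)
  | none =>
    match bkPartial cl l with
    | some k => some (1, k)
    | none =>
      match mapped with
      | some m => if m ≠ "" then (bkFindNorm m l).map (fun k => (2, k)) else none
      | none => none
set_option maxHeartbeats 1000000 in
theorem bkBest_eq_tri (cl : String) (mapped : Option String) (l : List (String × Int)) :
    bkBest cl mapped none l = bkTri cl mapped l := by
  induction l with
  | nil =>
    cases mapped with
    | none => rfl
    | some m =>
      by_cases hm : m = "" <;> simp [bkBest, bkTri, bkFindNorm, bkPartial, hm]
  | cons hd tl ih =>
    obtain ⟨k, v⟩ := hd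
    rw [bkBest_cons, ih]
    cases mapped with
    | none =>
      cases h0 : bkNorm k == cl with
      | true => simp [bkSing, bkRank?, bkTri, bkFindNorm, h0, bkMerge_zero]
      | false =>
        cases h1 : (PySem.Str.isIn (bkNorm k) cl || PySem.Str.isIn cl (bkNorm k)) with
        | true =>
          cases hf : bkFindNorm cl tl <;> cases hp : bkPartial cl tl <;>
            simp [bkSing, bkRank?, bkTri, bkFindNorm, bkPartial, bkMerge, h0, h1, hf, hp] <;> (try split_ifs) <;> simp_all
        | false =>
          cases hf : bkFindNorm cl tl <;> cases hp : bkPartial cl tl <;>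
            simp [bkSing, bkRank?, bkTri, bkFindNorm, bkPartial, bkMerge, h0, h1, hf, hp] <;> (try split_ifs) <;> simp_all
    | some m =>
      cases h0 : bkNorm k == cl with
      | true => simp [bkSing, bkRank?, bkTri, bkFindNorm, h0, bkMerge_zero]
      | false =>
        cases h1 : (PySem.Str.isIn (bkNorm k) cl || PySem.Str.isIn cl (bkNorm k)) with
        | true =>
          cases hf : bkFindNorm cl tl <;> cases hp : bkPartial cl tl <;>
            by_cases hm : m = "" <;> cases hq : bkFindNorm m tl <;>
            simp [bkSing, bkRank?, bkTri, bkFindNorm, bkPartial, bkMerge, h0, h1, hf, hp, hm, hq] <;> (try split_ifs) <;> simp_all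
        | false =>
          cases h2 : (m != "" && (bkNorm k == m)) with
          | true =>
            have hmne : m ≠ "" := by
              intro he; subst he; simp at h2
            have hkm : bkNorm k = m := by
              simp at h2; exact h2.2
            cases hf : bkFindNorm cl tl <;> cases hp : bkPartial cl tl <;>
              cases hq : bkFindNorm m tl <;>
              simp [bkSing, bkRank?, bkTri, bkFindNorm, bkPartial, bkMerge, h0, h1, hf, hp, hmne, hkm, hq] <;> (try split_ifs) <;> simp_all
          | false =>
            by_cases hm : m = ""
            · subst hm
              cases hf : bkFindNorm cl tl <;> cases hp : bkPartial cl tl <;>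
                simp [bkSing, bkRank?, bkTri, bkFindNorm, bkPartial, bkMerge, h0, h1, hf, hp] <;> (try split_ifs) <;> simp_all
            · have hkm : ¬ (bkNorm k = m) := by
                simp at h2
                exact h2 hm
              cases hf : bkFindNorm cl tl <;> cases hp : bkPartial cl tl <;>
                cases hq : bkFindNorm m tl <;>
                simp [bkSing, bkRank?, bkTri, bkFindNorm, bkPartial, bkMerge, h0, h1, hf, hp, hm, hkm, hq] <;> (try split_ifs) <;> simp_all

-- ===== VERDICT (by name: the statement is the Claim_ definition above) =====
theorem budget_key_for_spec : Claim_equal_budget_key_for := by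
  intro cat budget _
  show budget_key_for cat budget = budget_key_for_alt cat budget
  simp only [budget_key_for, budget_key_for_alt, bkAliasFallback, bkBest_eq_tri, bkTri]
  cases hf : bkFindNorm (bkNorm cat) budget with
  | some e => simp [hf]
  | none =>
    cases hp : bkPartial (bkNorm cat) budget with
    | some p => simp [hf, hp]
    | none =>
      cases hm : bkAlias.get? (bkNorm cat) with
      | none => simp [hf, hp, hm]
      | some m =>
        by_cases he : m = ""
        · simp [hf, hp, hm, he]
        · cases hq : bkFindNorm m budget <;> simp [hf, hp, hm, he, hq]
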